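-- pv_equiv track=rewrite | github.com/Buscedv/Ask | ask_lang/transpiler/utilities/translator_utils.py | get_tab_count
-- ===== SOURCE A (Python) =====
-- def get_tab_count(translated: str) -> str:
-- 	translated = translated[::-1]
--
-- 	indents = ''
-- 	for char in translated:
-- 		if char == '\t':
-- 			indents += char
-- 		elif char == '\n':
-- 			break
--
-- 	return indents
-- ===== SOURCE B (Python) =====
-- def get_tab_count(translated: str) -> str:
-- 	idx = translated.rfind('\n')
-- 	tail = translated[idx + 1:]
-- 	return '\t' * tail.count('\t')
-- ===== Notes on version B (the rewrite author's own statement) =====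
-- stated objective: simpler
-- what changed: Instead of reversing the whole string and scanning char-by-char with a break, B locates the last newline with rfind, slices off the trailing segment, and returns a tab repeated by that segment's tab count (C-level built-ins replace the Python loop).
import Mathlib
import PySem

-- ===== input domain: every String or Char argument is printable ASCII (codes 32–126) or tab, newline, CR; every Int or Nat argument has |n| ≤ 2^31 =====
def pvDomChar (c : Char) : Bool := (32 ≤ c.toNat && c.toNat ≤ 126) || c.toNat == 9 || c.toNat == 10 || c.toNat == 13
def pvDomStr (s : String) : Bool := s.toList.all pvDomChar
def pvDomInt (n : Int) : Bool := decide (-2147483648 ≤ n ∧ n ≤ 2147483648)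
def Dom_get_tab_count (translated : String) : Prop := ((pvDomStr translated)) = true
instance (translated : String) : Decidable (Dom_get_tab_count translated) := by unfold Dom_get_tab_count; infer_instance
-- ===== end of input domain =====

-- B replaces A's reverse-and-scan-with-break by rfind of the last newline plus a tab count of the trailing slice (simpler decomposition; a timing run measured B faster by a constant factor).

-- ===== PORT A =====
-- the for-loop over the reversed string: acc is `indents`, break on '\n'
def pvGoA : List Char → List Char → List Char
  | acc, [] => acc
  | acc, c :: rest =>
    if c = '\t' then pvGoA (acc ++ [c]) rest
    else if c = '\n' then acc
    else pvGoA acc rest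

def get_tab_count (translated : String) : String :=
  -- translated = translated[::-1]  (step -1 slice never raises, so getD is unreachable)
  let rev : List Char := (PySem.Chars.slice? translated.toList none none (-1)).getD []
  String.mk (pvGoA [] rev)

-- ===== PORT B =====
def get_tab_count_alt (translated : String) : String :=
  let cs := translated.toList
  let idx := PySem.Chars.rfind cs ['\n']
  let tail := PySem.Chars.slice cs (some (idx + 1)) none
  String.mk (List.replicate (PySem.Chars.count tail ['\t']) '\t')

-- ===== PRECONDITION & SPEC =====
def Spec_get_tab_count (translated : String) (out : String) : Prop := out = get_tab_count_alt translated
instance (translated : String) (out : String) : Decidable (Spec_get_tab_count translated out) := by unfold Spec_get_tab_count; infer_instance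

-- ===== CLAIM (what is proved, stated in full; the proofs are below) =====
def Claim_equal_get_tab_count : Prop := ∀ (translated : String), Dom_get_tab_count translated → Spec_get_tab_count translated (get_tab_count translated)

-- ===== LEMMAS AND PROOFS =====

-- A's loop collects exactly the tabs before the first newline of its input
theorem pvGoA_eq (l acc : List Char) :
    pvGoA acc l = acc ++ List.replicate ((l.takeWhile (· != '\n')).count '\t') '\t' := by
  induction l generalizing acc with
  | nil => simp [pvGoA]
  | cons c rest ih =>
    by_cases ht : c = '\t'
    · subst ht
      simp [pvGoA, ih, List.takeWhile, List.count_cons, List.replicate_succ]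
    · by_cases hn : c = '\n'
      · subst hn; simp [pvGoA, List.takeWhile]
      · simp [pvGoA, ht, hn, ih, List.takeWhile_cons, List.count_cons]

-- s.count(single char) is List.count
theorem count_go_single (c : Char) (l : List Char) (fuel acc : Nat) (h : l.length ≤ fuel) :
    PySem.Chars.count.go [c] fuel l acc = acc + l.count c := by
  induction l generalizing fuel acc with
  | nil => cases fuel <;> simp [PySem.Chars.count.go]
  | cons x t ih =>
    cases fuel with
    | zero => simp at h
    | succ f =>
      by_cases hx : x = c
      · subst hx
        have hp : ([x].isPrefixOf (x :: t)) = true := by simp [List.isPrefixOf]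
        have hgo : PySem.Chars.count.go [x] (f+1) (x :: t) acc
            = PySem.Chars.count.go [x] f t (acc + 1) := by
          simp [PySem.Chars.count.go, hp]
        rw [hgo, ih f (acc + 1) (by simp only [List.length_cons] at h; omega)]
        simp [List.count_cons]
        omega
      · have hp : ([c].isPrefixOf (x :: t)) = false := by
          simp [List.isPrefixOf, Ne.symm hx]
        have hgo : PySem.Chars.count.go [c] (f+1) (x :: t) acc
            = PySem.Chars.count.go [c] f t acc := by
          simp [PySem.Chars.count.go, hp]
        rw [hgo, ih f acc (by simp only [List.length_cons] at h; omega)]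
        simp [List.count_cons, hx]

theorem count_single (c : Char) (l : List Char) :
    PySem.Chars.count l [c] = l.count c := by
  simpa [PySem.Chars.count] using count_go_single c l l.length 0 le_rfl

-- characterization of rfind.go for the single-char pattern ['\n']
theorem rfind_go_newline (cs : List Char) : ∀ n, n ≤ cs.length →
    PySem.Chars.rfind.go cs ['\n'] n =
      (if '\n' ∈ cs.take (n+1)
       then ((cs.take (n+1)).length : Int) - (((cs.take (n+1)).reverse.takeWhile (· != '\n')).length : Int) - 1
       else -1) := by
  intro n
  induction n with
  | zero =>
    intro _
    cases cs with
    | nil => simp [PySem.Chars.rfind.go, List.isPrefixOf]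
    | cons c t =>
      by_cases hc : c = '\n'
      · subst hc; simp [PySem.Chars.rfind.go, List.isPrefixOf]
      · simp [PySem.Chars.rfind.go, List.isPrefixOf, hc, Ne.symm hc]
  | succ j ih =>
    intro hj
    simp only [PySem.Chars.rfind.go]
    by_cases hlen : j + 1 < cs.length
    · have hget : cs.drop (j+1) = cs[j+1] :: cs.drop (j+1+1) := by
        rw [List.drop_eq_getElem_cons hlen]
      by_cases hc : cs[j+1] = '\n'
      · have hpre : (['\n'].isPrefixOf (cs.drop (j+1))) = true := by
          rw [hget, hc]; simp [List.isPrefixOf]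
        rw [if_pos hpre]
        have htake : cs.take (j+1+1) = cs.take (j+1) ++ ['\n'] := by
          rw [List.take_succ, List.getElem?_eq_getElem hlen, hc]; rfl
        rw [htake]
        have hmem : '\n' ∈ cs.take (j+1) ++ ['\n'] := by simp
        rw [if_pos hmem]
        have hlt : (cs.take (j+1)).length = j+1 := by rw [List.length_take]; omega
        simp only [List.reverse_append, List.reverse_cons, List.reverse_nil, List.nil_append,
          List.singleton_append, List.takeWhile_cons, bne_self_eq_false, Bool.false_eq_true,
          if_false, List.length_nil, List.length_append, List.length_cons, hlt]
        push_cast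
        omega
      · have hpre : (['\n'].isPrefixOf (cs.drop (j+1))) = false := by
          rw [hget]; simp [List.isPrefixOf, Ne.symm hc]
        rw [if_neg (by simp [hpre])]
        rw [ih (by omega)]
        have htake : cs.take (j+1+1) = cs.take (j+1) ++ [cs[j+1]] := by
          rw [List.take_succ, List.getElem?_eq_getElem hlen]; rfl
        rw [htake]
        have hmem : '\n' ∈ cs.take (j+1) ++ [cs[j+1]] ↔ '\n' ∈ cs.take (j+1) := by
          simp only [List.mem_append, List.mem_cons, List.not_mem_nil, or_false]
          constructor
          · rintro (h | h)
            · exact h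
            · exact absurd h.symm hc
          · exact Or.inl
        by_cases hm : '\n' ∈ cs.take (j+1)
        · rw [if_pos hm, if_pos (hmem.mpr hm)]
          have hbne : (cs[j+1] != '\n') = true := by simp [hc]
          simp only [List.reverse_append, List.reverse_cons, List.reverse_nil, List.nil_append,
            List.singleton_append, List.takeWhile_cons, hbne, if_true,
            List.length_append, List.length_cons, List.length_nil]
          push_cast
          omega
        · rw [if_neg hm, if_neg (fun h => hm (hmem.mp h))]
      -- end j+1 < len
    · -- index j+1 is past the end: drop is [], prefix check fails, and take (j+1+1) = take (j+1)
      have hlen' : cs.length ≤ j + 1 := by omega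
      have hdrop : cs.drop (j+1) = [] := List.drop_eq_nil_of_le hlen'
      rw [hdrop]
      rw [if_neg (by simp [List.isPrefixOf])]
      rw [ih (by omega)]
      have : cs.take (j+1+1) = cs.take (j+1) := by
        rw [List.take_of_length_le (by omega), List.take_of_length_le (by omega)]
      rw [this]

-- the trailing segment after the last newline, as B slices it, is the reverse of
-- what A's reversed scan takes
theorem drop_rfind (cs : List Char) :
    cs.drop ((PySem.Chars.rfind cs ['\n'] + 1).toNat) = (cs.reverse.takeWhile (· != '\n')).reverse := by
  have h := rfind_go_newline cs cs.length le_rfl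
  rw [List.take_of_length_le (by omega)] at h
  have hr : PySem.Chars.rfind cs ['\n'] = PySem.Chars.rfind.go cs ['\n'] cs.length := rfl
  have hsplit : cs.reverse.takeWhile (· != '\n') ++ cs.reverse.dropWhile (· != '\n') = cs.reverse :=
    List.takeWhile_append_dropWhile
  by_cases hm : '\n' ∈ cs
  · rw [if_pos hm] at h
    have hklt : (cs.reverse.takeWhile (· != '\n')).length < cs.length := by
      rcases Nat.lt_or_ge (cs.reverse.takeWhile (· != '\n')).length cs.length with hlt | hge
      · exact hlt
      · exfalso
        have hkeq : cs.reverse.takeWhile (· != '\n') = cs.reverse :=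
          (List.takeWhile_prefix _).eq_of_length_le (by simpa using hge)
        have hall := List.takeWhile_eq_self_iff.mp hkeq
        have := hall '\n' (by simpa using hm)
        simp at this
    have hnn : PySem.Chars.rfind cs ['\n'] + 1
        = ((cs.length - (cs.reverse.takeWhile (· != '\n')).length : Nat) : Int) := by
      rw [hr, h]; push_cast; omega
    rw [hnn, Int.toNat_natCast]
    set tw := cs.reverse.takeWhile (· != '\n') with htw
    have hcs : cs = (cs.reverse.dropWhile (· != '\n')).reverse ++ tw.reverse := by
      conv_lhs => rw [← List.reverse_reverse cs, ← hsplit]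
      rw [List.reverse_append]
    rw [hcs, List.length_append]
    rw [show (cs.reverse.dropWhile (· != '\n')).reverse.length + tw.reverse.length - tw.length
          = (cs.reverse.dropWhile (· != '\n')).reverse.length by simp]
    rw [List.drop_left]
  · rw [if_neg hm] at h
    have hval : PySem.Chars.rfind cs ['\n'] = -1 := by rw [hr, h]
    rw [hval]
    have : cs.reverse.takeWhile (· != '\n') = cs.reverse := by
      rw [List.takeWhile_eq_self_iff]
      intro x hx
      simp only [bne_iff_ne, ne_eq]
      intro hxe; subst hxe
      exact hm (by simpa using hx)
    simp [this]

-- ===== VERDICT (by name: the statement is the Claim_ definition above) =====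
theorem get_tab_count_spec : Claim_equal_get_tab_count := by
  intro s _
  unfold Spec_get_tab_count get_tab_count get_tab_count_alt
  simp only
  rw [PySem.Chars.slice?_eq_listSlice?, PySem.List.slice?_none_none_neg_one]
  simp only [Option.getD_some]
  rw [pvGoA_eq]
  have h0 : (-1 : Int) ≤ PySem.Chars.rfind s.toList ['\n'] := by
    have h := rfind_go_newline s.toList s.toList.length le_rfl
    rw [List.take_of_length_le (by omega)] at h
    have hr : PySem.Chars.rfind s.toList ['\n'] = PySem.Chars.rfind.go s.toList ['\n'] s.toList.length := rfl
    have hle : (s.toList.reverse.takeWhile (· != '\n')).length ≤ s.toList.length := by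
      simpa using (List.takeWhile_sublist (l := s.toList.reverse) (· != '\n')).length_le
    rw [hr, h]
    split_ifs
    · omega
    · omega
  rw [PySem.Chars.slice_eq_listSlice,
    PySem.List.slice_from (xs := s.toList) (a := PySem.Chars.rfind s.toList ['\n'] + 1) (by omega)]
  rw [drop_rfind, count_single]
  simp [List.count_reverse]
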